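-- pv_equiv track=rewrite | github.com/Descanonge/tomate | time.py | get_collocated_times
-- ===== SOURCE A (Python) =====
-- def get_collocated_times(time1, time2):
--     """Find dates found both in time1 and time2.
--
--     Return lists for time1 and time2
--     """
--
--     l1 = []
--     l2 = []
--     for i1, t1 in enumerate(time1):
--         try:
--             i2 = time2.index(t1)
--         except ValueError:
--             pass
--         else:
--             l1.append(i1)
--             l2.append(i2)
--
--     return l1, l2
-- ===== SOURCE B (Python) =====
-- def get_collocated_times(time1, time2):
--     """Find dates found both in time1 and time2.
--
--     Return lists for time1 and time2
--     """
--     e1 = sorted(enumerate(time1), key=lambda p: p[1])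
--     e2 = sorted(enumerate(time2), key=lambda p: p[1])
--     pairs = []
--     j = 0
--     m = len(e2)
--     for i1, t in e1:
--         while j < m and e2[j][1] < t:
--             j += 1
--         if j < m and e2[j][1] == t:
--             pairs.append((i1, e2[j][0]))
--     pairs.sort(key=lambda p: p[0])
--     return [p[0] for p in pairs], [p[1] for p in pairs]
-- ===== Notes on version B (the rewrite author's own statement) =====
-- stated objective: faster
-- what changed: Sort-merge join: both lists are sorted by value (stably, keeping index order), a single two-pointer merge pairs each date of time1 with the first index of that date in time2, and the pairs are sorted back into time1 order, replacing A's linear time2.index scan per element.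
import Mathlib
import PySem

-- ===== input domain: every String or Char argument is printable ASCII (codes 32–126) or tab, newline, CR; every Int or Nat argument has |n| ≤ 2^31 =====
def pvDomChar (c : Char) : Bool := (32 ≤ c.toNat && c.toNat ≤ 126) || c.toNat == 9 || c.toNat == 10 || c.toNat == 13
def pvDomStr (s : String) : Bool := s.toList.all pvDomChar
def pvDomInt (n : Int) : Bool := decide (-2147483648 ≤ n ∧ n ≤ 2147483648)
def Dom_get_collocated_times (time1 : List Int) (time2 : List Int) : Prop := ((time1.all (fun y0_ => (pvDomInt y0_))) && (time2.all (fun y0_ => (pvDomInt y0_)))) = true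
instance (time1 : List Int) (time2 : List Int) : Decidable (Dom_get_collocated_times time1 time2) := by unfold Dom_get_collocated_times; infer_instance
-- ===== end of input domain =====

-- B replaces A's per-element linear time2.index scan by a sort-merge join (sort both index/value lists by value, one two-pointer merge, re-sort pairs by time1 index): faster.


-- ===== PORT A =====
-- loop over enumerate(time1); time2.index(t1) is PySem.List.index? (none = ValueError, skipped)
def get_collocated_times (time1 : List Int) (time2 : List Int) : List Int × List Int :=
  (PySem.List.enumerate time1).foldl
    (fun (acc : List Int × List Int) p =>
      match PySem.List.index? time2 p.2 with
      | none => acc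
      | some i2 => (acc.1 ++ [p.1], acc.2 ++ [(i2 : Int)]))
    ([], [])

-- ===== PORT B =====
-- while j < m and e2[j][1] < t: j += 1
def gct_advance (e2 : List (Int × Int)) (t : Int) (j : Nat) : Nat :=
  if h : j < e2.length then
    if (e2[j]).2 < t then gct_advance e2 t (j + 1) else j
  else j
termination_by e2.length - j

-- body of the merge loop: advance j, then `if j < m and e2[j][1] == t: pairs.append((i1, e2[j][0]))`
def gct_step (e2 : List (Int × Int)) (st : Nat × List (Int × Int)) (p : Int × Int) : Nat × List (Int × Int) :=
  let j := gct_advance e2 p.2 st.1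
  if h : j < e2.length then
    if (e2[j]).2 = p.2 then (j, st.2 ++ [(p.1, (e2[j]).1)]) else (j, st.2)
  else (j, st.2)

def get_collocated_times_alt (time1 : List Int) (time2 : List Int) : List Int × List Int :=
  let e1 := PySem.List.sorted (PySem.List.enumerate time1) (fun p => p.2)
  let e2 := PySem.List.sorted (PySem.List.enumerate time2) (fun p => p.2)
  let st := e1.foldl (gct_step e2) (0, [])
  let pairs := PySem.List.sorted st.2 (fun p => p.1)
  (pairs.map (fun p => p.1), pairs.map (fun p => p.2))

-- ===== PRECONDITION & SPEC =====
def Spec_get_collocated_times (time1 : List Int) (time2 : List Int) (out : List Int × List Int) : Prop := out = get_collocated_times_alt time1 time2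
instance (time1 : List Int) (time2 : List Int) (out : List Int × List Int) : Decidable (Spec_get_collocated_times time1 time2 out) := by unfold Spec_get_collocated_times; infer_instance

-- ===== CLAIM (what is proved, stated in full; the proofs are below) =====
def Claim_equal_get_collocated_times : Prop := ∀ (time1 : List Int) (time2 : List Int), Dom_get_collocated_times time1 time2 → Spec_get_collocated_times time1 time2 (get_collocated_times time1 time2)

-- ===== LEMMAS AND PROOFS =====

-- the pair both programs emit for an element p of enumerate(time1): none if p.2 is not in time2
def gct_specf (time2 : List Int) (p : Int × Int) : Option (Int × Int) :=
  (PySem.List.index? time2 p.2).map (fun k : Nat => (p.1, (k : Int)))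

theorem gct_A_fold (time2 : List Int) (L : List (Int × Int)) (acc : List Int × List Int) :
    L.foldl
      (fun (acc : List Int × List Int) p =>
        match PySem.List.index? time2 p.2 with
        | none => acc
        | some i2 => (acc.1 ++ [p.1], acc.2 ++ [(i2 : Int)])) acc
    = (acc.1 ++ (L.filterMap (gct_specf time2)).map (fun q => q.1),
       acc.2 ++ (L.filterMap (gct_specf time2)).map (fun q => q.2)) := by
  induction L generalizing acc with
  | nil => simp
  | cons p L ih =>
    simp only [List.foldl_cons]
    cases h : PySem.List.index? time2 p.2 with
    | none =>
      rw [ih]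
      simp [gct_specf, h, -PySem.List.index?_eq_idxOf?]
    | some k =>
      rw [ih]
      simp [gct_specf, h, -PySem.List.index?_eq_idxOf?]

-- stability of PySem's insertion sort, filter form: inserting x into a sorted list keeps
-- all earlier elements of equal key before x
theorem gct_insertBy_filter {a : Type} (key : a -> Int) (t : Int) (x : a) (ys : List a)
    (hs : ys.Pairwise (fun u v => key u <= key v)) :
    (PySem.List.insertBy (fun u v => decide (key u < key v)) x ys).filter (fun u => key u == t)
      = ys.filter (fun u => key u == t) ++ (if key x == t then [x] else []) := by
  induction ys with
  | nil => by_cases hx : key x = t <;> simp [PySem.List.insertBy, List.filter, hx]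
  | cons y ys ih =>
    rw [List.pairwise_cons] at hs
    show (if decide (key x < key y) = true then x :: y :: ys
          else y :: PySem.List.insertBy (fun u v => decide (key u < key v)) x ys).filter
            (fun u => key u == t) = _
    by_cases hlt : key x < key y
    · rw [if_pos (show decide (key x < key y) = true by simpa using hlt)]
      by_cases hx : key x = t
      · have hnil : List.filter (fun u => key u == t) (y :: ys) = [] := by
          rw [List.filter_eq_nil_iff]
          intro b hb
          have hyb : key y <= key b := by
            rcases List.mem_cons.mp hb with h | h
            · exact le_of_eq (by rw [h])
            · exact hs.1 _ h
          simp only [beq_iff_eq]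
          omega
        rw [List.filter_cons_of_pos (by simp [hx]), hnil]
        simp [hx]
      · rw [List.filter_cons_of_neg (by simp [hx])]
        simp [hx]
    · rw [if_neg (show ¬ decide (key x < key y) = true by simpa using hlt)]
      by_cases hy : key y = t
      · rw [List.filter_cons_of_pos (by simp [hy]), List.filter_cons_of_pos (by simp [hy]),
          ih hs.2, List.cons_append]
      · rw [List.filter_cons_of_neg (by simp [hy]), List.filter_cons_of_neg (by simp [hy]),
          ih hs.2]

-- full stability consequence: sorting does not change the subsequence of elements with a given key
theorem gct_filter_sorted {a : Type} (key : a -> Int) (t : Int) (L : List a) :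
    (PySem.List.sorted L key).filter (fun u => key u == t) = L.filter (fun u => key u == t) := by
  induction L using List.reverseRecOn with
  | nil => simp [PySem.List.sorted]
  | append_singleton L x ih =>
    rw [PySem.List.sorted_eq_foldl_insertBy, List.foldl_append, List.foldl_cons, List.foldl_nil,
      ← PySem.List.sorted_eq_foldl_insertBy,
      gct_insertBy_filter key t x _ (PySem.List.sorted_pairwise L key), ih, List.filter_append]
    cases hb : key x == t <;> simp [List.filter, hb]

theorem gct_find_enumerate (time2 : List Int) (t : Int) : ∀ s : Int,
    (PySem.List.enumerate time2 s).find? (fun p => p.2 == t)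
      = (PySem.List.index? time2 t).map (fun k : Nat => (s + (k : Int), t)) := by
  induction time2 with
  | nil => intro s; simp [PySem.List.enumerate_nil]
  | cons x xs ih =>
    intro s
    rw [PySem.List.enumerate_cons]
    by_cases hx : x = t
    · subst hx
      rw [PySem.List.index?_cons_self, List.find?_cons_of_pos (by simp)]
      simp
    · rw [PySem.List.index?_cons_of_ne xs hx]
      have hne : (((s, x) : Int × Int).2 == t) = false := by simp [hx]
      rw [List.find?_cons_of_neg (by simp [hx]), ih (s + 1)]
      cases PySem.List.index? xs t with
      | none => simp
      | some k =>
        simp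
        omega

-- first element of the stably sorted enumerate(time2) with value t = first occurrence in time2
theorem gct_e2_find (time2 : List Int) (t : Int) :
    (PySem.List.sorted (PySem.List.enumerate time2) (fun p => p.2)).find? (fun p => p.2 == t)
      = (PySem.List.index? time2 t).map (fun k : Nat => ((k : Int), t)) := by
  rw [← List.head?_filter]
  refine Eq.trans (congrArg List.head?
    (gct_filter_sorted (fun p : Int × Int => p.2) t (PySem.List.enumerate time2))) ?_
  rw [List.head?_filter, gct_find_enumerate time2 t 0]
  cases PySem.List.index? time2 t <;> simp

theorem gct_find?_eq_some_of_getElem {a : Type} (l : List a) (p : a -> Bool) (i : Nat)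
    (hi : i < l.length) (hp : p l[i] = true)
    (hprior : ∀ k (hk : k < i), p (l[k]'(Nat.lt_trans hk hi)) = false) :
    l.find? p = some l[i] := by
  induction l generalizing i with
  | nil => simp at hi
  | cons y l ih =>
    cases i with
    | zero => simpa using List.find?_cons_of_pos (l := l) hp
    | succ i =>
      have h0 : p y = false := hprior 0 (Nat.succ_pos i)
      rw [List.find?_cons_of_neg (by simp [h0])]
      exact ih i (by simpa using hi) (by simpa using hp)
        (fun k hk => hprior (k + 1) (by omega))

-- the two-pointer advance: afterwards every skipped element is < t and the pointer
-- rests on the first element that is not < t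
theorem gct_advance_spec (e2 : List (Int × Int)) (t : Int) (j : Nat)
    (hj : ∀ k (hk : k < e2.length), k < j → (e2[k]).2 < t) :
    (∀ k (hk : k < e2.length), k < gct_advance e2 t j → (e2[k]).2 < t) ∧
    (∀ h : gct_advance e2 t j < e2.length, ¬ (e2[gct_advance e2 t j]).2 < t) := by
  rw [gct_advance]
  split
  · next hlen =>
    split
    · next hval =>
      exact gct_advance_spec e2 t (j + 1)
        (fun k hk hlt => by
          rcases Nat.lt_succ_iff_lt_or_eq.mp hlt with h | h
          · exact hj k hk h
          · subst h; exact hval)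
    · next hval => exact ⟨hj, fun _ => hval⟩
  · next hlen => exact ⟨hj, fun h => absurd h hlen⟩
termination_by e2.length - j

-- one merge loop: with values nondecreasing on both sides and all skipped e2-entries
-- below every remaining time1 value, the loop appends exactly the spec pairs
theorem gct_loop (time2 : List Int) (e2 : List (Int × Int))
    (hsort : e2.Pairwise (fun u v => u.2 <= v.2))
    (hfind : ∀ t, e2.find? (fun p => p.2 == t)
      = (PySem.List.index? time2 t).map (fun k : Nat => ((k : Int), t))) :
    ∀ (l1 : List (Int × Int)) (j : Nat) (acc : List (Int × Int)),
    l1.Pairwise (fun u v => u.2 <= v.2) →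
    (∀ k (hk : k < e2.length), k < j → ∀ p ∈ l1, (e2[k]).2 < p.2) →
    (l1.foldl (gct_step e2) (j, acc)).2 = acc ++ l1.filterMap (gct_specf time2) := by
  intro l1
  induction l1 with
  | nil => intro j acc _ _; simp
  | cons p l1 ih =>
    intro j acc hpair hinv
    rw [List.pairwise_cons] at hpair
    have hj : ∀ k (hk : k < e2.length), k < j → (e2[k]).2 < p.2 :=
      fun k hk hlt => hinv k hk hlt p (List.mem_cons_self)
    obtain ⟨ha, hstop⟩ := gct_advance_spec e2 p.2 j hj
    have hinv' : ∀ k (hk : k < e2.length), k < gct_advance e2 p.2 j → ∀ q ∈ l1, (e2[k]).2 < q.2 :=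
      fun k hk hlt q hq => lt_of_lt_of_le (ha k hk hlt) (hpair.1 q hq)
    rw [List.foldl_cons]
    by_cases hlen : gct_advance e2 p.2 j < e2.length
    · by_cases hval : (e2[gct_advance e2 p.2 j]).2 = p.2
      · -- match: the pair (p.1, e2[j'].1) is exactly the spec pair
        have hstep : gct_step e2 (j, acc) p =
            (gct_advance e2 p.2 j, acc ++ [(p.1, (e2[gct_advance e2 p.2 j]).1)]) := by
          simp only [gct_step]
          rw [dif_pos hlen, if_pos hval]
        have hfound : e2.find? (fun q => q.2 == p.2) = some (e2[gct_advance e2 p.2 j]) :=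
          gct_find?_eq_some_of_getElem e2 _ _ hlen (by simp [hval])
            (fun k hk => by
              have := ha k (Nat.lt_trans hk hlen) hk
              exact beq_eq_false_iff_ne.mpr (by omega))
        rw [hfind p.2] at hfound
        cases hidx : PySem.List.index? time2 p.2 with
        | none => rw [hidx] at hfound; simp at hfound
        | some k =>
          rw [hidx] at hfound
          simp only [Option.map_some, Option.some.injEq] at hfound
          rw [hstep, ih _ _ hpair.2 hinv']
          have hfst : (e2[gct_advance e2 p.2 j]).1 = (k : Int) := by rw [← hfound]
          simp [gct_specf, hidx, hfst, -PySem.List.index?_eq_idxOf?]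
      · -- e2[j'].2 > p.2: p.2 does not occur in time2
        have hstep : gct_step e2 (j, acc) p = (gct_advance e2 p.2 j, acc) := by
          simp only [gct_step]
          rw [dif_pos hlen, if_neg hval]
        have hgt : p.2 < (e2[gct_advance e2 p.2 j]).2 := by
          rcases lt_trichotomy ((e2[gct_advance e2 p.2 j]).2) p.2 with h | h | h
          · exact absurd h (hstop hlen)
          · exact absurd h hval
          · exact h
        have hnone : PySem.List.index? time2 p.2 = none := by
          have hfindnone : e2.find? (fun q => q.2 == p.2) = none := by
            rw [List.find?_eq_none]
            intro q hq
            obtain ⟨i, hilen, hieq⟩ := List.getElem_of_mem hq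
            subst hieq
            by_cases hij : i < gct_advance e2 p.2 j
            · have := ha i hilen hij
              simp only [beq_iff_eq]
              omega
            · have hle : (e2[gct_advance e2 p.2 j]).2 <= (e2[i]).2 := by
                rcases Nat.lt_or_ge (gct_advance e2 p.2 j) i with h | h
                · exact List.pairwise_iff_getElem.mp hsort _ _ hlen hilen h
                · have : i = gct_advance e2 p.2 j := by omega
                  subst this; exact le_refl _
              simp only [beq_iff_eq]
              omega
          have h2 := hfind p.2
          rw [hfindnone] at h2
          cases h : PySem.List.index? time2 p.2 with
          | none => rfl
          | some k => rw [h] at h2; simp at h2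
        rw [hstep, ih _ _ hpair.2 hinv']
        simp [gct_specf, hnone, -PySem.List.index?_eq_idxOf?]
    · -- pointer ran off the end: all of e2 is < p.2, so p.2 not in time2
      have hstep : gct_step e2 (j, acc) p = (gct_advance e2 p.2 j, acc) := by
        simp only [gct_step]
        rw [dif_neg hlen]
      have hnone : PySem.List.index? time2 p.2 = none := by
        have hfindnone : e2.find? (fun q => q.2 == p.2) = none := by
          rw [List.find?_eq_none]
          intro q hq
          obtain ⟨i, hilen, hieq⟩ := List.getElem_of_mem hq
          subst hieq
          have := ha i hilen (by omega)
          simp only [beq_iff_eq]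
          omega
        have h2 := hfind p.2
        rw [hfindnone] at h2
        cases h : PySem.List.index? time2 p.2 with
        | none => rfl
        | some k => rw [h] at h2; simp at h2
      rw [hstep, ih _ _ hpair.2 hinv']
      simp [gct_specf, hnone, -PySem.List.index?_eq_idxOf?]

-- ===== VERDICT (by name: the statement is the Claim_ definition above) =====
theorem get_collocated_times_spec : Claim_equal_get_collocated_times := by
  intro time1 time2 _
  unfold Spec_get_collocated_times get_collocated_times get_collocated_times_alt
  rw [gct_A_fold time2 (PySem.List.enumerate time1) ([], [])]
  simp only [List.nil_append]
  have hsort : (PySem.List.sorted (PySem.List.enumerate time2) (fun p => p.2)).Pairwise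
      (fun u v => u.2 <= v.2) := PySem.List.sorted_pairwise _ _
  have hloop := gct_loop time2 _ hsort (gct_e2_find time2)
    (PySem.List.sorted (PySem.List.enumerate time1) (fun p => p.2)) 0 []
    (PySem.List.sorted_pairwise _ _) (fun k hk hlt => absurd hlt (by omega))
  rw [hloop]
  simp only [List.nil_append]
  -- the merged pairs sorted by first component are the spec pairs in enumerate order
  have hperm : ((PySem.List.sorted (PySem.List.enumerate time1) (fun p => p.2)).filterMap
      (gct_specf time2)).Perm ((PySem.List.enumerate time1).filterMap (gct_specf time2)) :=
    (PySem.List.sorted_perm _ _ _).filterMap _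
  have hpairS : ((PySem.List.enumerate time1).filterMap (gct_specf time2)).Pairwise
      (fun u v => u.1 < v.1) := by
    rw [List.pairwise_filterMap]
    refine (PySem.List.pairwise_lt_enumerate time1 0).imp ?_
    intro u v huv b hb b' hb'
    unfold gct_specf at hb hb'
    cases h : PySem.List.index? time2 u.2 with
    | none => rw [h] at hb; exact absurd hb (by simp)
    | some k =>
      rw [h] at hb
      cases h' : PySem.List.index? time2 v.2 with
      | none => rw [h'] at hb'; exact absurd hb' (by simp)
      | some k' =>
        rw [h'] at hb'
        simp only [Option.map_some, Option.some.injEq] at hb hb'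
        rw [← hb, ← hb']
        exact huv
  have hsorted : PySem.List.sorted
      ((PySem.List.sorted (PySem.List.enumerate time1) (fun p => p.2)).filterMap
        (gct_specf time2)) (fun p => p.1)
      = (PySem.List.enumerate time1).filterMap (gct_specf time2) :=
    PySem.List.sorted_eq_of_perm_of_pairwise_lt _ _ _ hperm.symm hpairS
  rw [hsorted]
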